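-- pv_equiv track=rewrite | github.com/jerrygergov/axxon-telegram-vms | axxon_telegram_vms/services/admin_view.py | _feature_flags
-- ===== SOURCE A (Python) =====
-- from collections.abc import Iterable, Mapping
--
-- def _text(value: object) -> str:
--     return str(value or "").strip()
--
-- def _feature_flags(feature_access: Iterable[object]) -> dict[str, bool]:
--     features = {_text(item) for item in feature_access if _text(item)}
--     return {
--         "domain_ops": "FEATURE_ACCESS_DOMAIN_MANAGING_OPS" in features,
--         "export": "FEATURE_ACCESS_EXPORT" in features,
--         "search": "FEATURE_ACCESS_SEARCH" in features,
--         "users_rights_setup": "FEATURE_ACCESS_USERS_RIGHTS_SETUP" in features,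
--         "devices_setup": "FEATURE_ACCESS_DEVICES_SETUP" in features,
--         "archives_setup": "FEATURE_ACCESS_ARCHIVES_SETUP" in features,
--         "detectors_setup": "FEATURE_ACCESS_DETECTORS_SETUP" in features,
--         "programming_setup": "FEATURE_ACCESS_PROGRAMMING_SETUP" in features,
--         "settings_setup": "FEATURE_ACCESS_SETTINGS_SETUP" in features,
--         "web_ui_login": "FEATURE_ACCESS_WEB_UI_LOGIN" in features,
--     }
-- ===== SOURCE B (Python) =====
-- def _text(value: object) -> str:
--     return str(value or "").strip()
--
-- _KEY_BY_FEATURE = {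
--     "FEATURE_ACCESS_DOMAIN_MANAGING_OPS": "domain_ops",
--     "FEATURE_ACCESS_EXPORT": "export",
--     "FEATURE_ACCESS_SEARCH": "search",
--     "FEATURE_ACCESS_USERS_RIGHTS_SETUP": "users_rights_setup",
--     "FEATURE_ACCESS_DEVICES_SETUP": "devices_setup",
--     "FEATURE_ACCESS_ARCHIVES_SETUP": "archives_setup",
--     "FEATURE_ACCESS_DETECTORS_SETUP": "detectors_setup",
--     "FEATURE_ACCESS_PROGRAMMING_SETUP": "programming_setup",
--     "FEATURE_ACCESS_SETTINGS_SETUP": "settings_setup",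
--     "FEATURE_ACCESS_WEB_UI_LOGIN": "web_ui_login",
-- }
--
-- def _feature_flags(feature_access):
--     flags = {key: False for key in _KEY_BY_FEATURE.values()}
--     for item in feature_access:
--         cleaned = _text(item)
--         if not cleaned:
--             continue
--         key = _KEY_BY_FEATURE.get(cleaned)
--         if key is not None:
--             flags[key] = True
--     return flags
-- ===== Notes on version B (the rewrite author's own statement) =====
-- stated objective: idiomatic
-- what changed: A builds a set of cleaned strings and probes it with ten membership tests; B inverts the traversal: it initializes all ten flags to False and makes one pass over the input, using a reverse-lookup table from feature string to flag key to set flags to True.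
import Mathlib
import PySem

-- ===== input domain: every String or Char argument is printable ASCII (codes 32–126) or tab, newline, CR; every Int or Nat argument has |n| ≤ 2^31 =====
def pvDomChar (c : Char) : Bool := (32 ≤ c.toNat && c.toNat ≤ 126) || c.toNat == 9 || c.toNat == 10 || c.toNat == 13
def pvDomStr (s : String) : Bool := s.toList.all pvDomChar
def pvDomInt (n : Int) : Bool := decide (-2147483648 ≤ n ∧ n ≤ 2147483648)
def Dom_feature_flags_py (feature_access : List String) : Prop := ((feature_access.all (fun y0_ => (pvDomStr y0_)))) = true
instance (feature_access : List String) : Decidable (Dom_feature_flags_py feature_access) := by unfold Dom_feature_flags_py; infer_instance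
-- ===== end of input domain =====

-- B replaces A's set-then-ten-membership-tests with an inverted single pass: all ten flags
-- start False and each cleaned input item sets its flag via a reverse feature→key lookup (idiomatic).

-- ===== PORT A =====
-- _text(item) on a string is item.strip() (the empty string is falsy, '' or '' == '')
def feature_flags_py (feature_access : List String) : List (String × Bool) :=
  let features : PySem.Set String :=
    PySem.Set.ofList
      ((feature_access.filter (fun item => PySem.Str.strip item ≠ "")).map
        (fun item => PySem.Str.strip item))
  [("domain_ops", PySem.Set.contains features "FEATURE_ACCESS_DOMAIN_MANAGING_OPS"),
   ("export", PySem.Set.contains features "FEATURE_ACCESS_EXPORT"),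
   ("search", PySem.Set.contains features "FEATURE_ACCESS_SEARCH"),
   ("users_rights_setup", PySem.Set.contains features "FEATURE_ACCESS_USERS_RIGHTS_SETUP"),
   ("devices_setup", PySem.Set.contains features "FEATURE_ACCESS_DEVICES_SETUP"),
   ("archives_setup", PySem.Set.contains features "FEATURE_ACCESS_ARCHIVES_SETUP"),
   ("detectors_setup", PySem.Set.contains features "FEATURE_ACCESS_DETECTORS_SETUP"),
   ("programming_setup", PySem.Set.contains features "FEATURE_ACCESS_PROGRAMMING_SETUP"),
   ("settings_setup", PySem.Set.contains features "FEATURE_ACCESS_SETTINGS_SETUP"),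
   ("web_ui_login", PySem.Set.contains features "FEATURE_ACCESS_WEB_UI_LOGIN")]

-- ===== PORT B =====
-- Source B's `flags` dict has a fixed set of ten keys updated in place; it is ported as a record
-- with one Bool field per key, written out in the dict's (fixed) insertion order at the end.
structure FFlags where
  domain_ops : Bool
  export' : Bool
  search : Bool
  users_rights_setup : Bool
  devices_setup : Bool
  archives_setup : Bool
  detectors_setup : Bool
  programming_setup : Bool
  settings_setup : Bool
  web_ui_login : Bool
deriving DecidableEq, Repr

-- the reverse lookup _KEY_BY_FEATURE.get(cleaned) followed by flags[key] = True
def ffSet (st : FFlags) (cleaned : String) : FFlags :=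
  if cleaned = "FEATURE_ACCESS_DOMAIN_MANAGING_OPS" then { st with domain_ops := true }
  else if cleaned = "FEATURE_ACCESS_EXPORT" then { st with export' := true }
  else if cleaned = "FEATURE_ACCESS_SEARCH" then { st with search := true }
  else if cleaned = "FEATURE_ACCESS_USERS_RIGHTS_SETUP" then { st with users_rights_setup := true }
  else if cleaned = "FEATURE_ACCESS_DEVICES_SETUP" then { st with devices_setup := true }
  else if cleaned = "FEATURE_ACCESS_ARCHIVES_SETUP" then { st with archives_setup := true }
  else if cleaned = "FEATURE_ACCESS_DETECTORS_SETUP" then { st with detectors_setup := true }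
  else if cleaned = "FEATURE_ACCESS_PROGRAMMING_SETUP" then { st with programming_setup := true }
  else if cleaned = "FEATURE_ACCESS_SETTINGS_SETUP" then { st with settings_setup := true }
  else if cleaned = "FEATURE_ACCESS_WEB_UI_LOGIN" then { st with web_ui_login := true }
  else st

def ffStep (st : FFlags) (item : String) : FFlags :=
  let cleaned := PySem.Str.strip item
  if cleaned = "" then st else ffSet st cleaned

def feature_flags_py_alt (feature_access : List String) : List (String × Bool) :=
  let st := feature_access.foldl ffStep ⟨false, false, false, false, false, false, false, false, false, false⟩
  [("domain_ops", st.domain_ops),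
   ("export", st.export'),
   ("search", st.search),
   ("users_rights_setup", st.users_rights_setup),
   ("devices_setup", st.devices_setup),
   ("archives_setup", st.archives_setup),
   ("detectors_setup", st.detectors_setup),
   ("programming_setup", st.programming_setup),
   ("settings_setup", st.settings_setup),
   ("web_ui_login", st.web_ui_login)]

-- ===== PRECONDITION & SPEC =====
def Spec_feature_flags_py (feature_access : List String) (out : List (String × Bool)) : Prop := out = feature_flags_py_alt feature_access
instance (feature_access : List String) (out : List (String × Bool)) : Decidable (Spec_feature_flags_py feature_access out) := by unfold Spec_feature_flags_py; infer_instance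

-- ===== CLAIM (what is proved, stated in full; the proofs are below) =====
def Claim_equal_feature_flags_py : Prop := ∀ (feature_access : List String), Dom_feature_flags_py feature_access → Spec_feature_flags_py feature_access (feature_flags_py feature_access)

-- ===== LEMMAS AND PROOFS =====

-- A's membership test for a nonempty feature string is just "some item strips to it"
theorem mem_feats (l : List String) (f : String) (hf : f ≠ "") :
    PySem.Set.contains
      (PySem.Set.ofList ((l.filter (fun item => PySem.Str.strip item ≠ "")).map
        (fun item => PySem.Str.strip item))) f
      = l.any (fun item => PySem.Str.strip item == f) := by
  rcases h : l.any (fun item => PySem.Str.strip item == f) with _ | _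
  · simp only [List.any_eq_false, beq_iff_eq] at h
    simp only [PySem.Set.contains_eq_listContains, List.contains_eq_mem,
      PySem.Set.mem_ofList, List.mem_map, List.mem_filter, decide_eq_false_iff_not]
    rintro ⟨x, ⟨hx, _⟩, hsx⟩
    exact h x hx hsx
  · simp only [List.any_eq_true, beq_iff_eq] at h
    obtain ⟨x, hx, hsx⟩ := h
    simp only [PySem.Set.contains_eq_listContains, List.contains_eq_mem,
      PySem.Set.mem_ofList, List.mem_map, List.mem_filter, decide_eq_true_iff]
    exact ⟨x, ⟨hx, by simp [hsx, hf]⟩, hsx⟩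

-- the B fold, started at any state, ORs each flag with the corresponding any-scan
set_option maxHeartbeats 2000000 in
theorem fold_spec (l : List String) (st : FFlags) :
    l.foldl ffStep st =
      ⟨st.domain_ops || l.any (fun i => PySem.Str.strip i == "FEATURE_ACCESS_DOMAIN_MANAGING_OPS"),
       st.export' || l.any (fun i => PySem.Str.strip i == "FEATURE_ACCESS_EXPORT"),
       st.search || l.any (fun i => PySem.Str.strip i == "FEATURE_ACCESS_SEARCH"),
       st.users_rights_setup || l.any (fun i => PySem.Str.strip i == "FEATURE_ACCESS_USERS_RIGHTS_SETUP"),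
       st.devices_setup || l.any (fun i => PySem.Str.strip i == "FEATURE_ACCESS_DEVICES_SETUP"),
       st.archives_setup || l.any (fun i => PySem.Str.strip i == "FEATURE_ACCESS_ARCHIVES_SETUP"),
       st.detectors_setup || l.any (fun i => PySem.Str.strip i == "FEATURE_ACCESS_DETECTORS_SETUP"),
       st.programming_setup || l.any (fun i => PySem.Str.strip i == "FEATURE_ACCESS_PROGRAMMING_SETUP"),
       st.settings_setup || l.any (fun i => PySem.Str.strip i == "FEATURE_ACCESS_SETTINGS_SETUP"),
       st.web_ui_login || l.any (fun i => PySem.Str.strip i == "FEATURE_ACCESS_WEB_UI_LOGIN")⟩ := by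
  induction l generalizing st with
  | nil => simp
  | cons hd tl ih =>
    simp only [List.foldl_cons, List.any_cons, ih, ffStep, ffSet]
    split_ifs <;> simp_all [Bool.or_comm]
    refine ⟨?_, ?_, ?_, ?_, ?_, ?_, ?_, ?_, ?_, ?_⟩ <;>
      (rw [beq_eq_false_iff_ne.mpr (by assumption)]; simp)

-- ===== VERDICT (by name: the statement is the Claim_ definition above) =====
theorem feature_flags_py_spec : Claim_equal_feature_flags_py := by
  intro l _
  show feature_flags_py l = feature_flags_py_alt l
  unfold feature_flags_py feature_flags_py_alt
  rw [fold_spec]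
  simp only [Bool.false_or]
  rw [mem_feats _ _ (by decide), mem_feats _ _ (by decide), mem_feats _ _ (by decide),
    mem_feats _ _ (by decide), mem_feats _ _ (by decide), mem_feats _ _ (by decide),
    mem_feats _ _ (by decide), mem_feats _ _ (by decide), mem_feats _ _ (by decide),
    mem_feats _ _ (by decide)]
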